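-- pv_equiv track=rewrite | github.com/performancefocusedconsulting-star/PWIN | pwin-competitive-intel/agent/ingest_organograms.py | _find_senior_staff_resource
-- ===== SOURCE A (Python) =====
-- from typing import Optional
--
-- def _find_senior_staff_resource(package: dict) -> Optional[dict]:
--     resources = package.get('resources', [])
--     candidates = [
--         r for r in resources
--         if 'senior' in (r.get('name') or '').lower()
--         or 'senior' in (r.get('url') or '').lower()
--     ]
--     if not candidates:
--         candidates = [
--             r for r in resources
--             if (r.get('format') or '').upper() in ('CSV', '')
--             and 'junior' not in (r.get('name') or '').lower()
--         ]
--     if not candidates: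
--         return None
--     candidates.sort(
--         key=lambda r: r.get('last_modified') or r.get('created') or '',
--         reverse=True,
--     )
--     return candidates[0]
-- ===== SOURCE B (Python) =====
-- from typing import Optional
--
-- def _find_senior_staff_resource(package: dict) -> Optional[dict]:
--     # Single pass, no sort: keep the first (date-key, resource) pair with the
--     # strictly greatest key for each of the two candidate classes.
--     def later(best, key, r):
--         # seed on first sight; replace only on a strictly greater key
--         if best is None or best[0] < key:
--             return (key, r)
--         return best
--
--     senior = None    # (key, resource) for 'senior' name/url matches
--     other = None     # (key, resource) for CSV/blank-format non-junior fallbacks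
--     for r in package.get('resources', []):
--         name = (r.get('name') or '').lower()
--         key = r.get('last_modified') or r.get('created') or ''
--         if 'senior' in name or 'senior' in (r.get('url') or '').lower():
--             senior = later(senior, key, r)
--         fmt = (r.get('format') or '').upper()
--         if fmt in ('CSV', '') and 'junior' not in name:
--             other = later(other, key, r)
--     if senior is not None:
--         return senior[1]
--     if other is not None:
--         return other[1]
--     return None
-- ===== Notes on version B (the rewrite author's own statement) =====
-- stated objective: alternative
-- what changed: Replaces A's two staged filter passes followed by a reverse stable sort with a single pass over the resources that maintains, for each of the two candidate classes (senior and CSV/blank-format non-junior fallback), the first resource carrying the strictly greatest date key, and selects senior over fallback at the end.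
import Mathlib
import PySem

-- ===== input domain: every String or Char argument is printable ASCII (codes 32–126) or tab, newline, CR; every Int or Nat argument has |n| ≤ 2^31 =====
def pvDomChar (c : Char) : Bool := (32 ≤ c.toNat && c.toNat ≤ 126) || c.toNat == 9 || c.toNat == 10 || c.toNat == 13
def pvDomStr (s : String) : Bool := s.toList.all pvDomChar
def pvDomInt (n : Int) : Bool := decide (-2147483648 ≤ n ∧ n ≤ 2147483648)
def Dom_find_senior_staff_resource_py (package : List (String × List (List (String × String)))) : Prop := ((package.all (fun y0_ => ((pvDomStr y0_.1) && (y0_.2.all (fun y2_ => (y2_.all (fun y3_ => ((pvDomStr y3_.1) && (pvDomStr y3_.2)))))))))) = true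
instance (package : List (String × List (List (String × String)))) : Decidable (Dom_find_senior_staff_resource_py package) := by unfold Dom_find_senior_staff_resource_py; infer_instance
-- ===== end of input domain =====

-- B replaces A's two filter passes plus a reverse stable sort by a single recursive pass keeping,
-- for each of the two candidate classes, the first resource with the strictly greatest date key
-- (objective: alternative, sort-free decomposition).

-- ===== PORT A =====
-- A-side helpers: `x or ''` on an optional string, r.get(k), the sort key and the two predicates

-- (r.get(k) or d): a present non-empty string wins, else the default
def pvOrStr (o : Option String) (d : String) : String :=
  match o with
  | some s => if s = "" then d else s
  | none => d

-- r.get(k) on the association-list dict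
def pvGet (r : List (String × String)) (k : String) : Option String :=
  PySem.Dict.get? (PySem.Dict.mk r) k

-- r.get('last_modified') or r.get('created') or ''
def pvKey (r : List (String × String)) : String :=
  pvOrStr (pvGet r "last_modified") (pvOrStr (pvGet r "created") "")

-- 'senior' in (r.get('name') or '').lower() or 'senior' in (r.get('url') or '').lower()
def pvSenior (r : List (String × String)) : Bool :=
  PySem.Str.isIn "senior" (PySem.Str.lower (pvOrStr (pvGet r "name") "")) ||
  PySem.Str.isIn "senior" (PySem.Str.lower (pvOrStr (pvGet r "url") ""))

-- (r.get('format') or '').upper() in ('CSV', '') and 'junior' not in (r.get('name') or '').lower()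
def pvFallback (r : List (String × String)) : Bool :=
  (PySem.Str.upper (pvOrStr (pvGet r "format") "") == "CSV" ||
   PySem.Str.upper (pvOrStr (pvGet r "format") "") == "") &&
  !(PySem.Str.isIn "junior" (PySem.Str.lower (pvOrStr (pvGet r "name") "")))

def find_senior_staff_resource_py (package : List (String × List (List (String × String)))) : Option (List (String × String)) :=
  let resources := PySem.Dict.getD (PySem.Dict.mk package) "resources" []
  let candidates := resources.filter pvSenior
  let candidates := if candidates.isEmpty then resources.filter pvFallback else candidates
  if candidates.isEmpty then none
  else (PySem.List.sorted candidates pvKey true).head?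

-- ===== PORT B =====
-- B-side helpers: hand-written first-match dict lookup, Python's `or ''` falsy coercion,
-- and the loop over resources as a structural recursion with the two (key, resource) accumulators.

-- r.get(q): first matching key wins (dict keys are unique in Python; exact as first-match lookup)
def altLookup : List (String × String) → String → Option String
  | [], _ => none
  | (k, v) :: t, q => if k = q then some v else altLookup t q

-- `x or ''` where x : Optional[str]: None and '' both collapse to ''
def altStr (o : Option String) : String :=
  match o with
  | none => ""
  | some s => s

-- later(best, key, r): seed on first sight; replace only on a strictly greater key
def altUpd (best : Option (String × List (String × String))) (key : String)
    (r : List (String × String)) : Option (String × List (String × String)) :=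
  match best with
  | none => some (key, r)
  | some p => if p.1 < key then some (key, r) else some p

-- r.get('last_modified') or r.get('created') or ''
def altKey (r : List (String × String)) : String :=
  let a := altStr (altLookup r "last_modified")
  if a = "" then altStr (altLookup r "created") else a

-- the for-loop of Source B: carries (senior, other) and computes the final selection at the end
def altScan : List (List (String × String)) →
    Option (String × List (String × String)) → Option (String × List (String × String)) →
    Option (List (String × String))
  | [], senior, other =>
    (match senior with
     | some p => some p.2
     | none =>
       match other with
       | some p => some p.2
       | none => none)
  | r :: rest, senior, other =>
    let name := PySem.Str.lower (altStr (altLookup r "name"))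
    let key := altKey r
    let senior' :=
      if PySem.Str.isIn "senior" name ||
         PySem.Str.isIn "senior" (PySem.Str.lower (altStr (altLookup r "url"))) then
        altUpd senior key r
      else senior
    let fmt := PySem.Str.upper (altStr (altLookup r "format"))
    let other' :=
      if (fmt == "CSV" || fmt == "") && !PySem.Str.isIn "junior" name then
        altUpd other key r
      else other
    altScan rest senior' other'

def find_senior_staff_resource_py_alt (package : List (String × List (List (String × String)))) : Option (List (String × String)) :=
  altScan (PySem.Dict.getD (PySem.Dict.mk package) "resources" []) none none

-- ===== PRECONDITION & SPEC =====
def Spec_find_senior_staff_resource_py (package : List (String × List (List (String × String)))) (out : Option (List (String × String))) : Prop := out = find_senior_staff_resource_py_alt package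
instance (package : List (String × List (List (String × String)))) (out : Option (List (String × String))) : Decidable (Spec_find_senior_staff_resource_py package out) := by unfold Spec_find_senior_staff_resource_py; infer_instance

-- ===== CLAIM (what is proved, stated in full; the proofs are below) =====
def Claim_equal_find_senior_staff_resource_py : Prop := ∀ (package : List (String × List (List (String × String)))), Dom_find_senior_staff_resource_py package → Spec_find_senior_staff_resource_py package (find_senior_staff_resource_py package)

-- ===== LEMMAS AND PROOFS =====

-- B's hand-written lookup is A's Dict.get?
theorem altLookup_eq (r : List (String × String)) (q : String) :
    altLookup r q = pvGet r q := by
  induction r with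
  | nil => rfl
  | cons p t ih =>
    cases p with
    | mk k v =>
      simp only [altLookup, pvGet, PySem.Dict.get?_mk_cons, beq_iff_eq]
      split_ifs with h
      · rfl
      · simpa [pvGet] using ih

-- `or ''` through the two coercions
theorem altStr_eq (o : Option String) : altStr o = pvOrStr o "" := by
  cases o with
  | none => rfl
  | some s => by_cases h : s = "" <;> simp [altStr, pvOrStr, h]

theorem altKey_eq (r : List (String × String)) : altKey r = pvKey r := by
  unfold altKey pvKey
  rw [altLookup_eq, altLookup_eq, altStr_eq]
  cases h : pvGet r "last_modified" with
  | none => simp [pvOrStr, altStr_eq]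
  | some s => by_cases hs : s = "" <;> simp [pvOrStr, hs, altStr_eq]

-- the single-accumulator update B performs, phrased over pvKey
def pvUpd (o : Option (String × List (String × String))) (r : List (String × String)) :
    Option (String × List (String × String)) :=
  match o with
  | none => some (pvKey r, r)
  | some p => if p.1 < pvKey r then some (pvKey r, r) else some p

-- the after-loop selection
def pvFinish (s f : Option (String × List (String × String))) : Option (List (String × String)) :=
  match s with
  | some p => some p.2
  | none =>
    match f with
    | some p => some p.2
    | none => none

theorem altScan_eq_foldl (xs : List (List (String × String)))
    (s f : Option (String × List (String × String))) :
    altScan xs s f = pvFinish ((xs.filter pvSenior).foldl pvUpd s) ((xs.filter pvFallback).foldl pvUpd f) := by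
  induction xs generalizing s f with
  | nil => rfl
  | cons r t ih =>
    have hsen : (PySem.Str.isIn "senior" (PySem.Str.lower (altStr (altLookup r "name"))) ||
        PySem.Str.isIn "senior" (PySem.Str.lower (altStr (altLookup r "url")))) = pvSenior r := by
      rw [altLookup_eq, altLookup_eq, altStr_eq, altStr_eq]; rfl
    have hfb : ((PySem.Str.upper (altStr (altLookup r "format")) == "CSV" ||
        PySem.Str.upper (altStr (altLookup r "format")) == "") &&
        !PySem.Str.isIn "junior" (PySem.Str.lower (altStr (altLookup r "name")))) = pvFallback r := by
      rw [altLookup_eq, altLookup_eq, altStr_eq, altStr_eq]; rfl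
    have hupd : ∀ o : Option (String × List (String × String)),
        altUpd o (altKey r) r = pvUpd o r := by
      intro o; cases o <;> simp [altUpd, pvUpd, altKey_eq]
    simp only [altScan, hsen, hfb, List.filter_cons]
    by_cases h1 : pvSenior r <;> by_cases h2 : pvFallback r <;>
      simp [h1, h2, ih, hupd]

-- tag a resource with its key, as pvUpd stores it
def pvTag (r : List (String × String)) : String × List (String × String) := (pvKey r, r)

theorem head?_insertBy (before : List (String × String) → List (String × String) → Bool)
    (x : List (String × String)) (acc : List (List (String × String))) :
    (PySem.List.insertBy before x acc).head? =
      some (match acc with | [] => x | y :: _ => if before x y then x else y) := by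
  cases acc with
  | nil => simp [PySem.List.insertBy]
  | cons y ys =>
    simp only [PySem.List.insertBy]
    split <;> simp

theorem foldl_insertBy_head (xs : List (List (String × String))) (acc : List (List (String × String))) :
    ((xs.foldl (fun acc x => PySem.List.insertBy (fun a b => decide (pvKey b < pvKey a)) x acc) acc).head?).map pvTag
      = xs.foldl pvUpd (acc.head?.map pvTag) := by
  induction xs generalizing acc with
  | nil => rfl
  | cons x t ih =>
    simp only [List.foldl_cons]
    rw [ih]
    congr 1
    rw [head?_insertBy]
    cases acc with
    | nil => rfl
    | cons y ys =>
      simp only [List.head?_cons, Option.map_some, pvTag, pvUpd]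
      split_ifs with h1 h2 h2 <;> simp_all

theorem foldl_upd_eq (xs : List (List (String × String))) :
    xs.foldl pvUpd none = ((PySem.List.sorted xs pvKey true).head?).map pvTag := by
  rw [PySem.List.sorted_rev_eq_foldl_insertBy, foldl_insertBy_head]
  rfl

theorem sorted_nil_iff (xs : List (List (String × String))) :
    PySem.List.sorted xs pvKey true = [] ↔ xs = [] := PySem.List.sorted_eq_nil_iff xs pvKey true

-- ===== VERDICT (by name: the statement is the Claim_ definition above) =====
theorem find_senior_staff_resource_py_spec : Claim_equal_find_senior_staff_resource_py := by
  intro package _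
  unfold Spec_find_senior_staff_resource_py find_senior_staff_resource_py find_senior_staff_resource_py_alt
  simp only []
  set res := PySem.Dict.getD (PySem.Dict.mk package) "resources" [] with hres
  rw [altScan_eq_foldl, foldl_upd_eq, foldl_upd_eq]
  rcases hS : PySem.List.sorted (res.filter pvSenior) pvKey true with _ | ⟨c, cs⟩
  · have hSe : res.filter pvSenior = [] := (sorted_nil_iff _).mp hS
    rcases hF : PySem.List.sorted (res.filter pvFallback) pvKey true with _ | ⟨d, ds⟩
    · have hFe : res.filter pvFallback = [] := (sorted_nil_iff _).mp hF
      simp [hSe, hFe, pvFinish]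
    · have hFne : res.filter pvFallback ≠ [] := by
        intro h; rw [h] at hF; simp [PySem.List.sorted] at hF
      simp [hSe, hF, List.isEmpty_iff, hFne, pvTag, pvFinish]
  · have hSne : res.filter pvSenior ≠ [] := by
      intro h; rw [h] at hS; simp [PySem.List.sorted] at hS
    simp [hS, List.isEmpty_iff, hSne, pvTag, pvFinish]
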